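-- pv_equiv track=rewrite | github.com/Tushar-Kartik/1923CS1064 | set matrix zero efficient.py | setmatirxzeros
-- ===== SOURCE A (Python) =====
-- def setmatirxzeros(matrix,n,m):
--     row=[1]*n
--     col=[1]*m
--
--     for i in range(0,n):
--         for j in range(0,m):
--             if matrix[i][j]==0:
--                 row[i] = 0
--                 col[j] = 0
--
--     for i in range(0,n):
--         for j in range(0,m):
--             if row[i]==0:
--                 matrix[i][j]=0
--     for j in range(0,m):
--         for i in range(0,n):
--             if col[j]==0:
--                 matrix[i][j]=0
--
--
--     return matrix
-- ===== SOURCE B (Python) =====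
-- def setmatirxzeros(matrix, n, m):
--     # Classic constant-extra-space algorithm: use row 0 and column 0 of the
--     # n x m working region as the zero markers instead of separate arrays.
--     if n <= 0 or m <= 0:
--         return matrix
--     first_row_zero = any(matrix[0][j] == 0 for j in range(m))
--     first_col_zero = any(matrix[i][0] == 0 for i in range(n))
--     for i in range(1, n):
--         for j in range(1, m):
--             if matrix[i][j] == 0:
--                 matrix[i][0] = 0
--                 matrix[0][j] = 0
--     for i in range(1, n):
--         for j in range(1, m):
--             if matrix[i][0] == 0 or matrix[0][j] == 0:
--                 matrix[i][j] = 0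
--     if first_row_zero:
--         for j in range(m):
--             matrix[0][j] = 0
--     if first_col_zero:
--         for i in range(n):
--             matrix[i][0] = 0
--     return matrix
-- ===== Notes on version B (the rewrite author's own statement) =====
-- stated objective: alternative
-- what changed: A allocates separate row/col marker arrays and clears marked rows and columns in two further full nested write passes; B uses the classic constant-extra-space algorithm that stores the markers in row 0 and column 0 of the working region (with first-row/first-col flags saved up front), then clears the interior from those in-matrix markers; Pre_ excludes inputs where A raises IndexError (n or m exceeding the actual dimensions with both positive).
import Mathlib
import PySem

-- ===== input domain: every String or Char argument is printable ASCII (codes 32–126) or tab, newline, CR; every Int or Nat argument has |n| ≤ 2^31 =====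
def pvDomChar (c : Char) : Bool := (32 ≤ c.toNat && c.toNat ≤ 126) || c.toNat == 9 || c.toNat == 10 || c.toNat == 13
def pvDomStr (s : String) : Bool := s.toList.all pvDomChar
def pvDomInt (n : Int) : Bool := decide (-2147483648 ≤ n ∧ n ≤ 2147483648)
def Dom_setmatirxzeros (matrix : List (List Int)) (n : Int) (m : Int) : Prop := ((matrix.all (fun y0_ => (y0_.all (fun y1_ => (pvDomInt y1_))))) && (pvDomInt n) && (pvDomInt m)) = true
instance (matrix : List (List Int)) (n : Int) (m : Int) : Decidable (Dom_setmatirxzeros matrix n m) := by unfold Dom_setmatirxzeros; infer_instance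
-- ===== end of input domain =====

-- B replaces A's separate row/col marker arrays by the classic constant-extra-space
-- algorithm that stores the markers in row 0 and column 0 of the working region;
-- both mutate `matrix` in place in Python, and the claim is about the return value.

-- ===== PORT A =====
-- matrix[i][j] (read); indices come from range(0,·), hence are nonnegative
def pvRead2 (mat : List (List Int)) (i j : Int) : Int :=
  (PySem.List.pyGet? ((PySem.List.pyGet? mat i).getD []) j).getD 0

-- matrix[i][j] = v ; again only used with nonnegative indices from range(0,·)
def pvWrite2 (mat : List (List Int)) (i j : Int) (v : Int) : List (List Int) :=
  mat.set i.toNat (((PySem.List.pyGet? mat i).getD []).set j.toNat v)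

-- first pass: mark rows/cols containing a zero (row/col start as [1]*n / [1]*m)
def pvMark (matrix : List (List Int)) (n m : Int) : List Int × List Int :=
  (PySem.List.pyRange 0 n).foldl (fun rc i =>
      (PySem.List.pyRange 0 m).foldl (fun (rc : List Int × List Int) j =>
        if pvRead2 matrix i j == 0 then (rc.1.set i.toNat 0, rc.2.set j.toNat 0) else rc) rc)
    (PySem.List.pyRepeat [(1:Int)] n, PySem.List.pyRepeat [(1:Int)] m)

-- second pass: zero out marked rows
def pvZeroRows (mat : List (List Int)) (row : List Int) (n m : Int) : List (List Int) :=
  (PySem.List.pyRange 0 n).foldl (fun mat i =>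
      (PySem.List.pyRange 0 m).foldl (fun mat j =>
        if (PySem.List.pyGet? row i).getD 1 == 0 then pvWrite2 mat i j 0 else mat) mat) mat

-- third pass: zero out marked columns
def pvZeroCols (mat : List (List Int)) (col : List Int) (n m : Int) : List (List Int) :=
  (PySem.List.pyRange 0 m).foldl (fun mat j =>
      (PySem.List.pyRange 0 n).foldl (fun mat i =>
        if (PySem.List.pyGet? col j).getD 1 == 0 then pvWrite2 mat i j 0 else mat) mat) mat

def setmatirxzeros (matrix : List (List Int)) (n : Int) (m : Int) : List (List Int) :=
  let rc := pvMark matrix n m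
  pvZeroCols (pvZeroRows matrix rc.1 n m) rc.2 n m

-- ===== PORT B =====
def setmatirxzeros_alt (matrix : List (List Int)) (n : Int) (m : Int) : List (List Int) :=
  if n ≤ 0 ∨ m ≤ 0 then matrix
  else
    let firstRowZero := (PySem.List.pyRange 0 m).any (fun j => pvRead2 matrix 0 j == 0)
    let firstColZero := (PySem.List.pyRange 0 n).any (fun i => pvRead2 matrix i 0 == 0)
    -- store the markers in row 0 / column 0 of the working region
    let mat1 := (PySem.List.pyRange 1 n).foldl (fun mat i =>
        (PySem.List.pyRange 1 m).foldl (fun mat j =>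
          if pvRead2 mat i j == 0 then pvWrite2 (pvWrite2 mat i 0 0) 0 j 0 else mat) mat) matrix
    -- zero the interior from the markers
    let mat2 := (PySem.List.pyRange 1 n).foldl (fun mat i =>
        (PySem.List.pyRange 1 m).foldl (fun mat j =>
          if pvRead2 mat i 0 == 0 || pvRead2 mat 0 j == 0 then pvWrite2 mat i j 0 else mat) mat) mat1
    let mat3 := if firstRowZero then (PySem.List.pyRange 0 m).foldl (fun mat j => pvWrite2 mat 0 j 0) mat2 else mat2
    if firstColZero then (PySem.List.pyRange 0 n).foldl (fun mat i => pvWrite2 mat i 0 0) mat3 else mat3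

-- ===== PRECONDITION & SPEC =====
-- Pre_ = exactly the inputs where A raises no IndexError: whenever both loop bounds are
-- positive, n must not exceed the number of rows and m must not exceed the length of any
-- of the first n rows (otherwise matrix[i][j] raises).
def Pre_setmatirxzeros (matrix : List (List Int)) (n : Int) (m : Int) : Prop :=
  0 < n → 0 < m → (n ≤ (matrix.length : Int) ∧ ∀ row ∈ matrix.take n.toNat, m ≤ (row.length : Int))
instance (matrix : List (List Int)) (n : Int) (m : Int) : Decidable (Pre_setmatirxzeros matrix n m) := by
  unfold Pre_setmatirxzeros; infer_instance

def pvWitness_setmatirxzeros : List (List Int) × Int × Int := ([[1, 0, 3], [4, 5, 6]], 2, 3)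

def Spec_setmatirxzeros (matrix : List (List Int)) (n : Int) (m : Int) (out : List (List Int)) : Prop := out = setmatirxzeros_alt matrix n m
instance (matrix : List (List Int)) (n : Int) (m : Int) (out : List (List Int)) : Decidable (Spec_setmatirxzeros matrix n m out) := by unfold Spec_setmatirxzeros; infer_instance

-- ===== CLAIM (what is proved, stated in full; the proofs are below) =====
def Claim_equal_setmatirxzeros : Prop := ∀ (matrix : List (List Int)) (n : Int) (m : Int), Dom_setmatirxzeros matrix n m → Pre_setmatirxzeros matrix n m → Spec_setmatirxzeros matrix n m (setmatirxzeros matrix n m)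

-- ===== LEMMAS AND PROOFS =====

-- entry (i,j) of a matrix, with defaults
def pvG (matrix : List (List Int)) (i j : Nat) : Int := (matrix.getD i []).getD j 0

def pvRowz (matrix : List (List Int)) (M : Nat) (i : Nat) : Bool :=
  (List.range M).any (fun j => pvG matrix i j == 0)

def pvColz (matrix : List (List Int)) (N : Nat) (j : Nat) : Bool :=
  (List.range N).any (fun i => pvG matrix i j == 0)

-- index pairs of two nested loops, flattened
def pvPairsL (l1 l2 : List Nat) : List (Nat × Nat) :=
  (l1.map (fun i => l2.map (fun j => (i, j)))).flatten

def pvPairs (N M : Nat) : List (Nat × Nat) := pvPairsL (List.range N) (List.range M)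

-- matrix[i][j] = 0 with Nat indices
def pvW (mat : List (List Int)) (i j : Nat) : List (List Int) :=
  mat.set i ((mat.getD i []).set j 0)

lemma pvWrite2_natCast (mat : List (List Int)) (i j : Nat) :
    pvWrite2 mat (i : Int) (j : Int) 0 = pvW mat i j := by
  simp [pvWrite2, pvW, PySem.List.pyGet?_natCast, List.getD_eq_getElem?_getD]

lemma pvRead2_natCast (matrix : List (List Int)) (i j : Nat) :
    pvRead2 matrix (i : Int) (j : Int) = pvG matrix i j := by
  simp [pvRead2, pvG, PySem.List.pyGet?_natCast, List.getD_eq_getElem?_getD]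

lemma mem_pvPairsL {l1 l2 : List Nat} {p : Nat × Nat} :
    p ∈ pvPairsL l1 l2 ↔ p.1 ∈ l1 ∧ p.2 ∈ l2 := by
  rcases p with ⟨a, b⟩
  simp only [pvPairsL, List.mem_flatten, List.mem_map]
  constructor
  · rintro ⟨l, ⟨i, hi, rfl⟩, hm⟩
    simp only [List.mem_map, Prod.mk.injEq] at hm
    obtain ⟨j, hj, rfl, rfl⟩ := hm
    exact ⟨hi, hj⟩
  · rintro ⟨ha, hb⟩
    exact ⟨l2.map (fun j => (a, j)), ⟨a, ha, rfl⟩,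
      by simp only [List.mem_map]; exact ⟨b, hb, rfl⟩⟩

lemma mem_pvPairs {N M : Nat} {p : Nat × Nat} :
    p ∈ pvPairs N M ↔ p.1 < N ∧ p.2 < M := by
  simp [pvPairs, mem_pvPairsL]

-- a nested for-loop is the flat loop over the pair list
lemma nested_foldl_list {β : Type} (l1 l2 : List Nat) (f : β → Nat → Nat → β) (b : β) :
    l1.foldl (fun acc i => l2.foldl (fun acc j => f acc i j) acc) b
      = (pvPairsL l1 l2).foldl (fun acc p => f acc p.1 p.2) b := by
  simp [pvPairsL, List.foldl_flatten, List.foldl_map]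

lemma nested_foldl {β : Type} (N M : Nat) (f : β → Nat → Nat → β) (b : β) :
    (List.range N).foldl (fun acc i => (List.range M).foldl (fun acc j => f acc i j) acc) b
      = (pvPairs N M).foldl (fun acc p => f acc p.1 p.2) b :=
  nested_foldl_list (List.range N) (List.range M) f b

-- a loop that sets cell (sel p) of a flat list to 0 whenever cond p holds
lemma foldl_set_sel {α : Type} (l : List α) (cond : α → Bool) (sel : α → Nat) (r : List Int) :
    (l.foldl (fun r p => if cond p then r.set (sel p) 0 else r) r).length = r.length ∧
    ∀ k d, (l.foldl (fun r p => if cond p then r.set (sel p) 0 else r) r).getD k d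
      = if l.any (fun p => cond p && (sel p == k)) && k < r.length then 0 else r.getD k d := by
  induction l generalizing r with
  | nil => simp
  | cons a t ih =>
    by_cases h : cond a
    · simp only [List.foldl_cons, h, if_true, List.any_cons, Bool.true_and]
      obtain ⟨ihl, ihg⟩ := ih (r.set (sel a) 0)
      rw [List.length_set] at ihl ihg
      refine ⟨ihl, ?_⟩
      intro k d
      rw [ihg k d]
      have hset : (r.set (sel a) 0).getD k d
          = if sel a = k ∧ k < r.length then (0 : Int) else r.getD k d := by
        simp only [List.getD_eq_getElem?_getD, List.getElem?_set]
        split_ifs with h1 h2 h3 h4 <;> simp_all <;> omega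
      rw [hset]
      by_cases hk : sel a = k <;> by_cases hkl : k < r.length <;>
        by_cases ht : t.any (fun p => cond p && (sel p == k)) <;>
          simp [hk, hkl, ht]
    · simp only [List.foldl_cons, h, if_false, List.any_cons, Bool.false_and,
        Bool.false_or]
      exact ih r

lemma pvW_length (mat : List (List Int)) (i j : Nat) : (pvW mat i j).length = mat.length := by
  simp [pvW]

lemma pvW_getD (mat : List (List Int)) (i j : Nat) (hi : i < mat.length) (i' : Nat) :
    (pvW mat i j).getD i' [] =
      if i = i' then (mat.getD i []).set j 0 else mat.getD i' [] := by
  simp only [pvW, List.getD_eq_getElem?_getD, List.getElem?_set]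
  split_ifs with h1 <;> simp [h1, hi]

lemma set_getD_zero (row : List Int) (j : Nat) (hj : j < row.length) (j' : Nat) :
    (row.set j 0).getD j' 0 = if j = j' then 0 else row.getD j' 0 := by
  simp only [List.getD_eq_getElem?_getD, List.getElem?_set]
  split_ifs with h1 <;> simp [h1, hj]

-- a loop that writes 0 into cell (sel1 p, sel2 p) of the matrix whenever cond p holds
lemma foldl_write2 {α : Type} (l : List α) (cond : α → Bool) (sel1 sel2 : α → Nat)
    (mat : List (List Int))
    (hb : ∀ p ∈ l, cond p → sel1 p < mat.length ∧ sel2 p < (mat.getD (sel1 p) []).length) :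
    (l.foldl (fun mat p => if cond p then pvW mat (sel1 p) (sel2 p) else mat) mat).length = mat.length ∧
    (∀ i, ((l.foldl (fun mat p => if cond p then pvW mat (sel1 p) (sel2 p) else mat) mat).getD i []).length
        = (mat.getD i []).length) ∧
    ∀ i j, ((l.foldl (fun mat p => if cond p then pvW mat (sel1 p) (sel2 p) else mat) mat).getD i []).getD j 0
      = if l.any (fun p => cond p && (sel1 p == i) && (sel2 p == j)) then 0
        else (mat.getD i []).getD j 0 := by
  induction l generalizing mat with
  | nil => simp
  | cons a t ih =>
    by_cases h : cond a
    · simp only [List.foldl_cons, h, if_true, List.any_cons, Bool.true_and]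
      obtain ⟨ha1, ha2⟩ := hb a List.mem_cons_self h
      have f2 := pvW_getD mat (sel1 a) (sel2 a) ha1
      have f2len : ∀ i, ((pvW mat (sel1 a) (sel2 a)).getD i []).length = (mat.getD i []).length := by
        intro i
        rw [f2 i]
        split_ifs with hi
        · rw [← hi, List.length_set]
        · rfl
      have f3 : ∀ i j, ((pvW mat (sel1 a) (sel2 a)).getD i []).getD j 0
          = if (sel1 a == i) && (sel2 a == j) then 0 else (mat.getD i []).getD j 0 := by
        intro i j
        rw [f2 i]
        by_cases hi : sel1 a = i
        · subst hi
          rw [if_pos rfl, set_getD_zero _ _ ha2 j]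
          by_cases hj : sel2 a = j <;> simp [hj]
        · simp [hi]
      obtain ⟨l1, l2, l3⟩ := ih (pvW mat (sel1 a) (sel2 a)) (by
        intro p hp hc
        obtain ⟨g1, g2⟩ := hb p (List.mem_cons_of_mem a hp) hc
        rw [pvW_length]
        exact ⟨g1, by rw [f2len]; exact g2⟩)
      rw [pvW_length] at l1
      refine ⟨l1, fun i => by rw [l2 i, f2len i], ?_⟩
      intro i j
      rw [l3 i j, f3 i j]
      by_cases h1 : (sel1 a == i) && (sel2 a == j) <;>
        by_cases h2 : t.any (fun p => cond p && (sel1 p == i) && (sel2 p == j)) <;>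
          simp [h1, h2]
    · simp only [List.foldl_cons, h, if_false, List.any_cons, Bool.false_and,
        Bool.false_or]
      exact ih mat (fun p hp hc => hb p (List.mem_cons_of_mem a hp) hc)

-- characterisation of A's first pass
lemma pvMark_spec (matrix : List (List Int)) (N M : Nat) :
    (pvMark matrix (N : Int) (M : Int)).1.length = N ∧
    (pvMark matrix (N : Int) (M : Int)).2.length = M ∧
    (∀ i, i < N → (pvMark matrix (N : Int) (M : Int)).1.getD i 1
        = if pvRowz matrix M i then 0 else 1) ∧
    (∀ j, j < M → (pvMark matrix (N : Int) (M : Int)).2.getD j 1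
        = if pvColz matrix N j then 0 else 1) := by
  have e1 : pvMark matrix (N : Int) (M : Int) =
      ((pvPairs N M).foldl (fun r p => if pvG matrix p.1 p.2 == 0 then r.set p.1 0 else r)
         (List.replicate N 1),
       (pvPairs N M).foldl (fun c p => if pvG matrix p.1 p.2 == 0 then c.set p.2 0 else c)
         (List.replicate M 1)) := by
    unfold pvMark
    simp only [PySem.List.pyRange_zero_natCast, List.foldl_map, Int.toNat_natCast,
      pvRead2_natCast, PySem.List.pyRepeat_singleton]
    rw [nested_foldl N M
      (fun (rc : List Int × List Int) (i j : Nat) =>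
        if pvG matrix i j == 0 then (rc.1.set i 0, rc.2.set j 0) else rc)]
    rw [PySem.List.foldl_congr_mem' (pvPairs N M)
      (fun (rc : List Int × List Int) (p : Nat × Nat) =>
        if pvG matrix p.1 p.2 == 0 then (rc.1.set p.1 0, rc.2.set p.2 0) else rc)
      (fun (rc : List Int × List Int) (p : Nat × Nat) =>
        (if pvG matrix p.1 p.2 == 0 then rc.1.set p.1 0 else rc.1,
         if pvG matrix p.1 p.2 == 0 then rc.2.set p.2 0 else rc.2)) _
      (by intro p _ acc; by_cases h : pvG matrix p.1 p.2 == 0 <;> simp [h])]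
    exact PySem.List.foldl_prod_mk
      (fun (r : List Int) (p : Nat × Nat) => if pvG matrix p.1 p.2 == 0 then r.set p.1 0 else r)
      (fun (c : List Int) (p : Nat × Nat) => if pvG matrix p.1 p.2 == 0 then c.set p.2 0 else c)
      (pvPairs N M) (List.replicate N 1) (List.replicate M 1)
  obtain ⟨s1l, s1g⟩ := foldl_set_sel (pvPairs N M) (fun p => pvG matrix p.1 p.2 == 0)
    (fun p => p.1) (List.replicate N 1)
  obtain ⟨s2l, s2g⟩ := foldl_set_sel (pvPairs N M) (fun p => pvG matrix p.1 p.2 == 0)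
    (fun p => p.2) (List.replicate M 1)
  rw [e1]
  refine ⟨by simpa using s1l, by simpa using s2l, ?_, ?_⟩
  · intro i hi
    rw [s1g i 1]
    have hany : (pvPairs N M).any (fun p => (pvG matrix p.1 p.2 == 0) && (p.1 == i))
        = pvRowz matrix M i := by
      rw [Bool.eq_iff_iff]
      simp only [List.any_eq_true, mem_pvPairs, pvRowz, List.mem_range, Bool.and_eq_true,
        beq_iff_eq]
      constructor
      · rintro ⟨p, ⟨h1, h2⟩, hq, rfl⟩
        exact ⟨p.2, h2, hq⟩
      · rintro ⟨j, hj, hq⟩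
        exact ⟨(i, j), ⟨hi, hj⟩, hq, rfl⟩
    rw [hany]
    have : (List.replicate N (1 : Int)).getD i 1 = 1 := by
      simp [List.getD_eq_getElem?_getD, List.getElem?_replicate, hi]
    rw [this]
    by_cases hr : pvRowz matrix M i <;> simp [hr, hi]
  · intro j hj
    rw [s2g j 1]
    have hany : (pvPairs N M).any (fun p => (pvG matrix p.1 p.2 == 0) && (p.2 == j))
        = pvColz matrix N j := by
      rw [Bool.eq_iff_iff]
      simp only [List.any_eq_true, mem_pvPairs, pvColz, List.mem_range, Bool.and_eq_true,
        beq_iff_eq]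
      constructor
      · rintro ⟨p, ⟨h1, h2⟩, hq, rfl⟩
        exact ⟨p.1, h1, hq⟩
      · rintro ⟨i, hi, hq⟩
        exact ⟨(i, j), ⟨hi, hj⟩, hq, rfl⟩
    rw [hany]
    have : (List.replicate M (1 : Int)).getD j 1 = 1 := by
      simp [List.getD_eq_getElem?_getD, List.getElem?_replicate, hj]
    rw [this]
    by_cases hc : pvColz matrix N j <;> simp [hc, hj]

lemma getD_mem_take (matrix : List (List Int)) (N i : Nat) (hi : i < N)
    (hiL : i < matrix.length) : matrix.getD i [] ∈ matrix.take N := by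
  have h2 : (matrix.take N)[i]? = some (matrix.getD i []) := by
    rw [List.getElem?_take]
    simp [hi, List.getElem?_eq_getElem hiL, List.getD_eq_getElem?_getD]
  exact List.mem_of_getElem? h2

-- characterisation of A's result in the main case
lemma setmatirxzeros_spec_main (matrix : List (List Int)) (N M : Nat)
    (hN : N ≤ matrix.length) (hM : ∀ row ∈ matrix.take N, M ≤ row.length) :
    (setmatirxzeros matrix (N : Int) (M : Int)).length = matrix.length ∧
    (∀ i, ((setmatirxzeros matrix (N : Int) (M : Int)).getD i []).length
        = (matrix.getD i []).length) ∧
    ∀ i j, ((setmatirxzeros matrix (N : Int) (M : Int)).getD i []).getD j 0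
      = if i < N ∧ j < M ∧ (pvRowz matrix M i ∨ pvColz matrix N j) then 0
        else pvG matrix i j := by
  obtain ⟨mrl, mcl, mrow, mcol⟩ := pvMark_spec matrix N M
  have hbound : ∀ p : Nat × Nat, p.1 < N → p.2 < M →
      p.1 < matrix.length ∧ p.2 < (matrix.getD p.1 []).length := by
    intro p h1 h2
    have hiL : p.1 < matrix.length := lt_of_lt_of_le h1 hN
    exact ⟨hiL, lt_of_lt_of_le h2 (hM _ (getD_mem_take matrix N p.1 h1 hiL))⟩
  have e2 : pvZeroRows matrix (pvMark matrix (N : Int) (M : Int)).1 (N : Int) (M : Int)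
      = (pvPairs N M).foldl
          (fun mat p => if pvRowz matrix M p.1 then pvW mat p.1 p.2 else mat) matrix := by
    unfold pvZeroRows
    simp only [PySem.List.pyRange_zero_natCast, List.foldl_map, pvWrite2_natCast,
      PySem.List.pyGet?_natCast, ← List.getD_eq_getElem?_getD]
    rw [nested_foldl N M
      (fun mat i j => if (pvMark matrix (N : Int) (M : Int)).1.getD i 1 == 0
        then pvW mat i j else mat)]
    apply PySem.List.foldl_congr_mem'
    intro p hp acc
    rw [mem_pvPairs] at hp
    rw [mrow p.1 hp.1]
    by_cases hr : pvRowz matrix M p.1 <;> simp [hr]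
  have e3 : ∀ mat, pvZeroCols mat (pvMark matrix (N : Int) (M : Int)).2 (N : Int) (M : Int)
      = (pvPairs M N).foldl
          (fun mat p => if pvColz matrix N p.1 then pvW mat p.2 p.1 else mat) mat := by
    intro mat
    unfold pvZeroCols
    simp only [PySem.List.pyRange_zero_natCast, List.foldl_map, pvWrite2_natCast,
      PySem.List.pyGet?_natCast, ← List.getD_eq_getElem?_getD]
    rw [nested_foldl M N
      (fun mat j i => if (pvMark matrix (N : Int) (M : Int)).2.getD j 1 == 0
        then pvW mat i j else mat)]
    apply PySem.List.foldl_congr_mem'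
    intro p hp acc
    rw [mem_pvPairs] at hp
    rw [mcol p.1 hp.1]
    by_cases hc : pvColz matrix N p.1 <;> simp [hc]
  obtain ⟨a1, a2, a3⟩ := foldl_write2 (pvPairs N M) (fun p => pvRowz matrix M p.1)
    (fun p => p.1) (fun p => p.2) matrix
    (by intro p hp _; rw [mem_pvPairs] at hp; exact hbound p hp.1 hp.2)
  set mat1 := (pvPairs N M).foldl
    (fun mat p => if pvRowz matrix M p.1 then pvW mat p.1 p.2 else mat) matrix with hmat1
  obtain ⟨b1, b2, b3⟩ := foldl_write2 (pvPairs M N) (fun p => pvColz matrix N p.1)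
    (fun p => p.2) (fun p => p.1) mat1
    (by intro p hp _
        rw [mem_pvPairs] at hp
        obtain ⟨g1, g2⟩ := hbound (p.2, p.1) hp.2 hp.1
        rw [a1, a2]
        exact ⟨g1, g2⟩)
  have eA : setmatirxzeros matrix (N : Int) (M : Int)
      = (pvPairs M N).foldl
          (fun mat p => if pvColz matrix N p.1 then pvW mat p.2 p.1 else mat) mat1 := by
    show pvZeroCols (pvZeroRows matrix (pvMark matrix (N : Int) (M : Int)).1 (N : Int) (M : Int))
        (pvMark matrix (N : Int) (M : Int)).2 (N : Int) (M : Int) = _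
    rw [e2, e3]
  rw [eA]
  refine ⟨by rw [b1, a1], fun i => by rw [b2 i, a2 i], ?_⟩
  intro i j
  rw [b3 i j, a3 i j]
  have hany2 : (pvPairs N M).any (fun p => pvRowz matrix M p.1 && (p.1 == i) && (p.2 == j))
      = (decide (i < N) && decide (j < M) && pvRowz matrix M i) := by
    rw [Bool.eq_iff_iff]
    simp only [List.any_eq_true, mem_pvPairs, Bool.and_eq_true, beq_iff_eq, decide_eq_true_eq]
    constructor
    · rintro ⟨p, ⟨h1, h2⟩, ⟨hr, rfl⟩, rfl⟩
      exact ⟨⟨h1, h2⟩, hr⟩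
    · rintro ⟨⟨h1, h2⟩, hr⟩
      exact ⟨(i, j), ⟨h1, h2⟩, ⟨hr, rfl⟩, rfl⟩
  have hany3 : (pvPairs M N).any (fun p => pvColz matrix N p.1 && (p.2 == i) && (p.1 == j))
      = (decide (i < N) && decide (j < M) && pvColz matrix N j) := by
    rw [Bool.eq_iff_iff]
    simp only [List.any_eq_true, mem_pvPairs, Bool.and_eq_true, beq_iff_eq, decide_eq_true_eq]
    constructor
    · rintro ⟨p, ⟨h1, h2⟩, ⟨hc, rfl⟩, rfl⟩
      exact ⟨⟨h2, h1⟩, hc⟩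
    · rintro ⟨⟨h1, h2⟩, hc⟩
      exact ⟨(j, i), ⟨h2, h1⟩, ⟨hc, rfl⟩, rfl⟩
  rw [hany2, hany3]
  by_cases h1 : i < N <;> by_cases h2 : j < M <;>
    by_cases h3 : pvRowz matrix M i <;> by_cases h4 : pvColz matrix N j <;>
      simp [h1, h2, h3, h4, pvG]

-- ===== B-side lemmas =====

-- unconditional entry description of a single write (out-of-range writes are no-ops,
-- and out-of-range reads default to 0, so no bounds are needed)
lemma pvG_pvW (mat : List (List Int)) (a b i j : Nat) :
    pvG (pvW mat a b) i j = if a = i ∧ b = j then 0 else pvG mat i j := by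
  by_cases ha : a = i <;> by_cases hb : b = j <;>
    by_cases haL : a < mat.length <;>
      by_cases hbL : b < (mat.getD a []).length <;>
        simp_all [pvG, pvW, List.getD_eq_getElem?_getD, List.getElem?_set,
          List.getElem?_eq_none_iff]

lemma pvW_rowlen (mat : List (List Int)) (a b i : Nat) :
    ((pvW mat a b).getD i []).length = (mat.getD i []).length := by
  by_cases ha : a = i <;> by_cases haL : a < mat.length <;>
    simp_all [pvW, List.getD_eq_getElem?_getD, List.getElem?_set,
      List.getElem?_eq_none_iff] <;>
    simp_all [List.getElem?_eq_none (show mat.length ≤ a by omega)]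

-- a loop of conditional single writes, unconditional characterisation
lemma foldl_condW {α : Type} (l : List α) (cond : α → Bool) (s1 s2 : α → Nat)
    (mat : List (List Int)) :
    (l.foldl (fun mat p => if cond p then pvW mat (s1 p) (s2 p) else mat) mat).length = mat.length ∧
    (∀ i, ((l.foldl (fun mat p => if cond p then pvW mat (s1 p) (s2 p) else mat) mat).getD i []).length
        = (mat.getD i []).length) ∧
    ∀ i j, pvG (l.foldl (fun mat p => if cond p then pvW mat (s1 p) (s2 p) else mat) mat) i j
      = if l.any (fun p => cond p && (s1 p == i) && (s2 p == j)) then 0 else pvG mat i j := by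
  induction l generalizing mat with
  | nil => simp
  | cons a t ih =>
    by_cases h : cond a
    · simp only [List.foldl_cons, h, if_true, List.any_cons, Bool.true_and]
      obtain ⟨l1, l2, l3⟩ := ih (pvW mat (s1 a) (s2 a))
      rw [pvW_length] at l1
      refine ⟨l1, fun i => by rw [l2 i, pvW_rowlen], ?_⟩
      intro i j
      rw [l3 i j, pvG_pvW]
      by_cases h1 : s1 a = i <;> by_cases h2 : s2 a = j <;>
        by_cases h3 : t.any (fun p => cond p && (s1 p == i) && (s2 p == j)) <;>
          simp [h1, h2, h3]
    · simp only [List.foldl_cons, h, List.any_cons, Bool.false_and, Bool.false_or]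
      exact ih mat

-- marker pass: reads are at interior cells, writes at row 0 / column 0, so the reads
-- may be taken from the initial matrix
lemma pass1_congr (matrix : List (List Int)) (l : List (Nat × Nat))
    (hl : ∀ p ∈ l, 1 ≤ p.1 ∧ 1 ≤ p.2) (mat : List (List Int))
    (hinv : ∀ i j, 1 ≤ i → 1 ≤ j → pvG mat i j = pvG matrix i j) :
    l.foldl (fun mat p => if pvG mat p.1 p.2 == 0 then pvW (pvW mat p.1 0) 0 p.2 else mat) mat
      = l.foldl (fun mat p => if pvG matrix p.1 p.2 == 0 then pvW (pvW mat p.1 0) 0 p.2 else mat) mat := by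
  induction l generalizing mat with
  | nil => rfl
  | cons a t ih =>
    obtain ⟨ha1, ha2⟩ := hl a List.mem_cons_self
    have hstep : ∀ mat' : List (List Int),
        (∀ i j, 1 ≤ i → 1 ≤ j → pvG mat' i j = pvG matrix i j) →
        (∀ i j, 1 ≤ i → 1 ≤ j → pvG (pvW (pvW mat' a.1 0) 0 a.2) i j = pvG matrix i j) := by
      intro mat' hmi i j hi hj
      rw [pvG_pvW, pvG_pvW]
      rw [if_neg (by omega), if_neg (by omega)]
      exact hmi i j hi hj
    simp only [List.foldl_cons, hinv a.1 a.2 ha1 ha2]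
    by_cases hc : pvG matrix a.1 a.2 == 0
    · simp only [hc, if_true]
      exact ih (fun p hp => hl p (List.mem_cons_of_mem a hp)) (pvW (pvW mat a.1 0) 0 a.2)
        (hstep mat hinv)
    · simp only [hc]
      exact ih (fun p hp => hl p (List.mem_cons_of_mem a hp)) mat hinv

-- marker pass characterisation
lemma pass1_char (matrix : List (List Int)) (l : List (Nat × Nat)) (mat : List (List Int)) :
    (l.foldl (fun mat p => if pvG matrix p.1 p.2 == 0 then pvW (pvW mat p.1 0) 0 p.2 else mat) mat).length = mat.length ∧
    (∀ i, ((l.foldl (fun mat p => if pvG matrix p.1 p.2 == 0 then pvW (pvW mat p.1 0) 0 p.2 else mat) mat).getD i []).length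
        = (mat.getD i []).length) ∧
    ∀ i j, pvG (l.foldl (fun mat p => if pvG matrix p.1 p.2 == 0 then pvW (pvW mat p.1 0) 0 p.2 else mat) mat) i j
      = if l.any (fun p => (pvG matrix p.1 p.2 == 0) && ((p.1 == i && 0 == j) || (0 == i && p.2 == j)))
        then 0 else pvG mat i j := by
  induction l generalizing mat with
  | nil => simp
  | cons a t ih =>
    by_cases h : pvG matrix a.1 a.2 == 0
    · simp only [List.foldl_cons, h, if_true, List.any_cons, Bool.true_and]
      obtain ⟨l1, l2, l3⟩ := ih (pvW (pvW mat a.1 0) 0 a.2)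
      rw [pvW_length, pvW_length] at l1
      refine ⟨l1, fun i => by rw [l2 i, pvW_rowlen, pvW_rowlen], ?_⟩
      intro i j
      rw [l3 i j, pvG_pvW, pvG_pvW]
      by_cases h5 : t.any (fun p => (pvG matrix p.1 p.2 == 0) && ((p.1 == i && 0 == j) || (0 == i && p.2 == j)))
      · simp [h5]
      · simp only [h5, Bool.or_false]
        by_cases h1 : a.1 = i <;> by_cases h2 : (0 : Nat) = j <;>
          by_cases h3 : (0 : Nat) = i <;> by_cases h4 : a.2 = j <;>
            simp [h1, h2, h3, h4]
    · simp only [List.foldl_cons, h, List.any_cons, Bool.false_and, Bool.false_or]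
      exact ih mat

-- interior pass: reads are at row 0 / column 0, writes at interior cells, so the reads
-- may be taken from the pass's initial matrix
lemma pass2_congr (mat1 : List (List Int)) (l : List (Nat × Nat))
    (hl : ∀ p ∈ l, 1 ≤ p.1 ∧ 1 ≤ p.2) (mat : List (List Int))
    (hinv : (∀ i, pvG mat i 0 = pvG mat1 i 0) ∧ (∀ j, pvG mat 0 j = pvG mat1 0 j)) :
    l.foldl (fun mat p => if (pvG mat p.1 0 == 0 || pvG mat 0 p.2 == 0) then pvW mat p.1 p.2 else mat) mat
      = l.foldl (fun mat p => if (pvG mat1 p.1 0 == 0 || pvG mat1 0 p.2 == 0) then pvW mat p.1 p.2 else mat) mat := by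
  induction l generalizing mat with
  | nil => rfl
  | cons a t ih =>
    obtain ⟨ha1, ha2⟩ := hl a List.mem_cons_self
    have hstep : ∀ mat' : List (List Int),
        ((∀ i, pvG mat' i 0 = pvG mat1 i 0) ∧ (∀ j, pvG mat' 0 j = pvG mat1 0 j)) →
        ((∀ i, pvG (pvW mat' a.1 a.2) i 0 = pvG mat1 i 0) ∧
         (∀ j, pvG (pvW mat' a.1 a.2) 0 j = pvG mat1 0 j)) := by
      intro mat' hmi
      constructor
      · intro i
        rw [pvG_pvW, if_neg (by omega)]
        exact hmi.1 i
      · intro j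
        rw [pvG_pvW, if_neg (by omega)]
        exact hmi.2 j
    simp only [List.foldl_cons, hinv.1 a.1, hinv.2 a.2]
    by_cases hc : (pvG mat1 a.1 0 == 0 || pvG mat1 0 a.2 == 0)
    · simp only [hc, if_true]
      exact ih (fun p hp => hl p (List.mem_cons_of_mem a hp)) (pvW mat a.1 a.2)
        (hstep mat hinv)
    · simp only [hc]
      exact ih (fun p hp => hl p (List.mem_cons_of_mem a hp)) mat hinv

-- [1, n) as a Nat list, and the pyRange bridge
def pvR1 (N : Nat) : List Nat := (List.range (N - 1)).map (fun k => k + 1)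

lemma mem_pvR1 {N i : Nat} : i ∈ pvR1 N ↔ 1 ≤ i ∧ i < N := by
  simp only [pvR1, List.mem_map, List.mem_range]
  constructor
  · rintro ⟨k, hk, rfl⟩; omega
  · rintro ⟨h1, h2⟩; exact ⟨i - 1, by omega, by omega⟩

lemma pyRange_one_natCast (N : Nat) :
    PySem.List.pyRange 1 (N : Int) = (pvR1 N).map (fun (i : Nat) => (i : Int)) := by
  rw [PySem.List.pyRange_one]
  have h1 : ((N : Int) - 1).toNat = N - 1 := by omega
  rw [h1]
  simp only [pvR1, List.map_map, Function.comp_def]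
  apply List.map_congr_left
  intro k _
  push_cast
  ring

-- index-0 specialisations of the read/write bridges
lemma pvRead2_cast0R (mat : List (List Int)) (i : Nat) :
    pvRead2 mat (i : Int) 0 = pvG mat i 0 := by simpa using pvRead2_natCast mat i 0

lemma pvRead2_cast0L (mat : List (List Int)) (j : Nat) :
    pvRead2 mat 0 (j : Int) = pvG mat 0 j := by simpa using pvRead2_natCast mat 0 j

lemma pvWrite2_cast0R (mat : List (List Int)) (i : Nat) :
    pvWrite2 mat (i : Int) 0 0 = pvW mat i 0 := by simpa using pvWrite2_natCast mat i 0

lemma pvWrite2_cast0L (mat : List (List Int)) (j : Nat) :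
    pvWrite2 mat 0 (j : Int) 0 = pvW mat 0 j := by simpa using pvWrite2_natCast mat 0 j

-- rowz/colz split at index 0
lemma rowz_split (matrix : List (List Int)) (M i : Nat) (hM : 1 ≤ M) :
    pvRowz matrix M i = true ↔
      pvG matrix i 0 = 0 ∨ ∃ j, 1 ≤ j ∧ j < M ∧ pvG matrix i j = 0 := by
  simp only [pvRowz, List.any_eq_true, List.mem_range, beq_iff_eq]
  constructor
  · rintro ⟨j, hj, hq⟩
    by_cases h0 : j = 0
    · subst h0; exact Or.inl hq
    · exact Or.inr ⟨j, by omega, hj, hq⟩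
  · rintro (h | ⟨j, h1, h2, hq⟩)
    · exact ⟨0, by omega, h⟩
    · exact ⟨j, h2, hq⟩

lemma colz_split (matrix : List (List Int)) (N j : Nat) (hN : 1 ≤ N) :
    pvColz matrix N j = true ↔
      pvG matrix 0 j = 0 ∨ ∃ i, 1 ≤ i ∧ i < N ∧ pvG matrix i j = 0 := by
  simp only [pvColz, List.any_eq_true, List.mem_range, beq_iff_eq]
  constructor
  · rintro ⟨i, hi, hq⟩
    by_cases h0 : i = 0
    · subst h0; exact Or.inl hq
    · exact Or.inr ⟨i, by omega, hi, hq⟩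
  · rintro (h | ⟨i, h1, h2, hq⟩)
    · exact ⟨0, by omega, h⟩
    · exact ⟨i, h2, hq⟩

-- B's four stages at the Nat level
def pvStage1 (matrix : List (List Int)) (N M : Nat) : List (List Int) :=
  (pvPairsL (pvR1 N) (pvR1 M)).foldl
    (fun mat p => if pvG matrix p.1 p.2 == 0 then pvW (pvW mat p.1 0) 0 p.2 else mat) matrix

def pvStage2 (matrix : List (List Int)) (N M : Nat) : List (List Int) :=
  (pvPairsL (pvR1 N) (pvR1 M)).foldl
    (fun mat p => if (pvG (pvStage1 matrix N M) p.1 0 == 0 || pvG (pvStage1 matrix N M) 0 p.2 == 0)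
      then pvW mat p.1 p.2 else mat) (pvStage1 matrix N M)

def pvStage3 (matrix : List (List Int)) (N M : Nat) : List (List Int) :=
  if (List.range M).any (fun j => pvG matrix 0 j == 0)
    then (List.range M).foldl (fun mat j => pvW mat 0 j) (pvStage2 matrix N M)
    else pvStage2 matrix N M

def pvStage4 (matrix : List (List Int)) (N M : Nat) : List (List Int) :=
  if (List.range N).any (fun i => pvG matrix i 0 == 0)
    then (List.range N).foldl (fun mat i => pvW mat i 0) (pvStage3 matrix N M)
    else pvStage3 matrix N M

lemma hpairs_ge1 (N M : Nat) : ∀ p ∈ pvPairsL (pvR1 N) (pvR1 M), 1 ≤ p.1 ∧ 1 ≤ p.2 := by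
  intro p hp
  rw [mem_pvPairsL] at hp
  obtain ⟨h1, h2⟩ := hp
  rw [mem_pvR1] at h1 h2
  exact ⟨h1.1, h2.1⟩

-- the port equals the staged Nat-level computation
lemma alt_eq_stage (matrix : List (List Int)) (N M : Nat) (hN1 : 1 ≤ N) (hM1 : 1 ≤ M) :
    setmatirxzeros_alt matrix (N : Int) (M : Int) = pvStage4 matrix N M := by
  unfold setmatirxzeros_alt
  rw [if_neg (by push_cast; omega)]
  simp only [pyRange_one_natCast, PySem.List.pyRange_zero_natCast, List.foldl_map,
    List.any_map, pvRead2_natCast, pvWrite2_natCast, pvRead2_cast0R, pvRead2_cast0L,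
    pvWrite2_cast0R, pvWrite2_cast0L, Function.comp_def,
    nested_foldl_list (pvR1 N) (pvR1 M)]
  rw [pass1_congr matrix _ (hpairs_ge1 N M) matrix (fun _ _ _ _ => rfl)]
  have h1 : List.foldl (fun mat p => if pvG matrix p.1 p.2 == 0 then pvW (pvW mat p.1 0) 0 p.2 else mat)
      matrix (pvPairsL (pvR1 N) (pvR1 M)) = pvStage1 matrix N M := rfl
  rw [h1]
  rw [pass2_congr (pvStage1 matrix N M) _ (hpairs_ge1 N M) (pvStage1 matrix N M)
    ⟨fun _ => rfl, fun _ => rfl⟩]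
  rfl

-- characterisation of B's result in the main case
lemma setmatirxzeros_alt_spec_main (matrix : List (List Int)) (N M : Nat)
    (hN1 : 1 ≤ N) (hM1 : 1 ≤ M) :
    (setmatirxzeros_alt matrix (N : Int) (M : Int)).length = matrix.length ∧
    (∀ i, ((setmatirxzeros_alt matrix (N : Int) (M : Int)).getD i []).length
        = (matrix.getD i []).length) ∧
    ∀ i j, ((setmatirxzeros_alt matrix (N : Int) (M : Int)).getD i []).getD j 0
      = if i < N ∧ j < M ∧ (pvRowz matrix M i ∨ pvColz matrix N j) then 0
        else pvG matrix i j := by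
  rw [alt_eq_stage matrix N M hN1 hM1]
  -- stage 1 facts
  obtain ⟨s1len, s1row, s1get⟩ := pass1_char matrix (pvPairsL (pvR1 N) (pvR1 M)) matrix
  have t1len : (pvStage1 matrix N M).length = matrix.length := s1len
  have t1row : ∀ i, ((pvStage1 matrix N M).getD i []).length = (matrix.getD i []).length := s1row
  have t1get : ∀ i j, pvG (pvStage1 matrix N M) i j
      = if (pvPairsL (pvR1 N) (pvR1 M)).any
          (fun p => (pvG matrix p.1 p.2 == 0) && ((p.1 == i && 0 == j) || (0 == i && p.2 == j)))
        then 0 else pvG matrix i j := s1get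
  -- pointwise consequences for stage 1
  have hg1a : ∀ i j, 1 ≤ i → 1 ≤ j → pvG (pvStage1 matrix N M) i j = pvG matrix i j := by
    intro i j hi hj
    rw [t1get i j, if_neg]
    simp only [List.any_eq_true, mem_pvPairsL, mem_pvR1, Bool.and_eq_true, Bool.or_eq_true,
      beq_iff_eq, not_exists]
    rintro p ⟨⟨⟨a1, a2⟩, b1, b2⟩, hc, (⟨d1, d2⟩ | ⟨d1, d2⟩)⟩ <;> omega
  have hg1out : ∀ i j, ¬ (i < N ∧ j < M) → pvG (pvStage1 matrix N M) i j = pvG matrix i j := by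
    intro i j hij
    rw [t1get i j, if_neg]
    simp only [List.any_eq_true, mem_pvPairsL, mem_pvR1, Bool.and_eq_true, Bool.or_eq_true,
      beq_iff_eq, not_exists]
    rintro p ⟨⟨⟨a1, a2⟩, b1, b2⟩, hc, (⟨d1, d2⟩ | ⟨d1, d2⟩)⟩ <;> exact hij (by omega)
  have hg1row : ∀ i, 1 ≤ i → pvG (pvStage1 matrix N M) i 0
      = if i < N ∧ ∃ j, j < M ∧ 1 ≤ j ∧ pvG matrix i j = 0 then 0 else pvG matrix i 0 := by
    intro i hi
    rw [t1get i 0]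
    by_cases hC : i < N ∧ ∃ j, j < M ∧ 1 ≤ j ∧ pvG matrix i j = 0
    · obtain ⟨hiN, j, hjM, hj1, hq⟩ := hC
      rw [if_pos, if_pos ⟨hiN, j, hjM, hj1, hq⟩]
      simp only [List.any_eq_true, mem_pvPairsL, mem_pvR1, Bool.and_eq_true, Bool.or_eq_true,
        beq_iff_eq]
      exact ⟨(i, j), ⟨⟨hi, hiN⟩, hj1, hjM⟩, hq, Or.inl (by simp)⟩
    · rw [if_neg, if_neg hC]
      simp only [List.any_eq_true, mem_pvPairsL, mem_pvR1, Bool.and_eq_true, Bool.or_eq_true,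
        beq_iff_eq, not_exists]
      rintro p ⟨⟨⟨a1, a2⟩, b1, b2⟩, hc, (⟨d1, d2⟩ | ⟨d1, d2⟩)⟩
      · exact hC ⟨by omega, p.2, b2, b1, by rw [d1] at hc; exact hc⟩
      · omega
  have hg1col : ∀ j, 1 ≤ j → pvG (pvStage1 matrix N M) 0 j
      = if j < M ∧ ∃ i, i < N ∧ 1 ≤ i ∧ pvG matrix i j = 0 then 0 else pvG matrix 0 j := by
    intro j hj
    rw [t1get 0 j]
    by_cases hC : j < M ∧ ∃ i, i < N ∧ 1 ≤ i ∧ pvG matrix i j = 0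
    · obtain ⟨hjM, i, hiN, hi1, hq⟩ := hC
      rw [if_pos, if_pos ⟨hjM, i, hiN, hi1, hq⟩]
      simp only [List.any_eq_true, mem_pvPairsL, mem_pvR1, Bool.and_eq_true, Bool.or_eq_true,
        beq_iff_eq]
      exact ⟨(i, j), ⟨⟨hi1, hiN⟩, hj, hjM⟩, hq, Or.inr (by simp)⟩
    · rw [if_neg, if_neg hC]
      simp only [List.any_eq_true, mem_pvPairsL, mem_pvR1, Bool.and_eq_true, Bool.or_eq_true,
        beq_iff_eq, not_exists]
      rintro p ⟨⟨⟨a1, a2⟩, b1, b2⟩, hc, (⟨d1, d2⟩ | ⟨d1, d2⟩)⟩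
      · omega
      · exact hC ⟨by omega, p.1, a2, a1, by rw [d2] at hc; exact hc⟩
  have hg100 : pvG (pvStage1 matrix N M) 0 0 = pvG matrix 0 0 := by
    rw [t1get 0 0, if_neg]
    simp only [List.any_eq_true, mem_pvPairsL, mem_pvR1, Bool.and_eq_true, Bool.or_eq_true,
      beq_iff_eq, not_exists]
    rintro p ⟨⟨⟨a1, a2⟩, b1, b2⟩, hc, (⟨d1, d2⟩ | ⟨d1, d2⟩)⟩ <;> omega
  -- stage 2 facts
  obtain ⟨s2len, s2row, s2get⟩ := foldl_condW (pvPairsL (pvR1 N) (pvR1 M))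
    (fun p => (pvG (pvStage1 matrix N M) p.1 0 == 0 || pvG (pvStage1 matrix N M) 0 p.2 == 0))
    Prod.fst Prod.snd (pvStage1 matrix N M)
  have t2len : (pvStage2 matrix N M).length = matrix.length := s2len.trans t1len
  have t2row : ∀ i, ((pvStage2 matrix N M).getD i []).length = (matrix.getD i []).length :=
    fun i => (s2row i).trans (t1row i)
  have t2 : ∀ i j, pvG (pvStage2 matrix N M) i j
      = if (1 ≤ i ∧ i < N ∧ 1 ≤ j ∧ j < M)
            ∧ (pvG (pvStage1 matrix N M) i 0 = 0 ∨ pvG (pvStage1 matrix N M) 0 j = 0)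
        then 0 else pvG (pvStage1 matrix N M) i j := by
    intro i j
    have e : pvG (pvStage2 matrix N M) i j
        = if (pvPairsL (pvR1 N) (pvR1 M)).any
            (fun p => (pvG (pvStage1 matrix N M) p.1 0 == 0 || pvG (pvStage1 matrix N M) 0 p.2 == 0)
              && (Prod.fst p == i) && (Prod.snd p == j))
          then 0 else pvG (pvStage1 matrix N M) i j := s2get i j
    have hiff : ((pvPairsL (pvR1 N) (pvR1 M)).any
        (fun p => (pvG (pvStage1 matrix N M) p.1 0 == 0 || pvG (pvStage1 matrix N M) 0 p.2 == 0)
          && (Prod.fst p == i) && (Prod.snd p == j)) = true)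
        ↔ ((1 ≤ i ∧ i < N ∧ 1 ≤ j ∧ j < M)
            ∧ (pvG (pvStage1 matrix N M) i 0 = 0 ∨ pvG (pvStage1 matrix N M) 0 j = 0)) := by
      simp only [List.any_eq_true, mem_pvPairsL, mem_pvR1, Bool.and_eq_true, Bool.or_eq_true,
        beq_iff_eq]
      constructor
      · rintro ⟨p, ⟨⟨a1, a2⟩, b1, b2⟩, ⟨hc, hd⟩, he⟩
        subst hd; subst he
        exact ⟨⟨a1, a2, b1, b2⟩, hc⟩
      · rintro ⟨⟨h1, h2, h3, h4⟩, hc⟩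
        exact ⟨(i, j), ⟨⟨h1, h2⟩, h3, h4⟩, ⟨hc, rfl⟩, rfl⟩
    rw [e]
    by_cases hC : (1 ≤ i ∧ i < N ∧ 1 ≤ j ∧ j < M)
        ∧ (pvG (pvStage1 matrix N M) i 0 = 0 ∨ pvG (pvStage1 matrix N M) 0 j = 0)
    · rw [if_pos (hiff.mpr hC), if_pos hC]
    · rw [if_neg (fun hh => hC (hiff.mp hh)), if_neg hC]
  -- stage 3 facts
  obtain ⟨s3len, s3row, s3get⟩ := foldl_condW (List.range M)
    (fun _ => true) (fun _ => 0) (fun j => j) (pvStage2 matrix N M)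
  have t3len : (pvStage3 matrix N M).length = matrix.length := by
    unfold pvStage3
    split_ifs
    · exact s3len.trans t2len
    · exact t2len
  have t3row : ∀ i, ((pvStage3 matrix N M).getD i []).length = (matrix.getD i []).length := by
    intro i
    unfold pvStage3
    split_ifs
    · exact (s3row i).trans (t2row i)
    · exact t2row i
  have t3 : ∀ i j, pvG (pvStage3 matrix N M) i j
      = if pvRowz matrix M 0 = true ∧ i = 0 ∧ j < M then 0 else pvG (pvStage2 matrix N M) i j := by
    intro i j
    have hiff : ((List.range M).any (fun p => true && ((0 : Nat) == i) && (p == j)) = true)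
        ↔ (i = 0 ∧ j < M) := by
      simp only [List.any_eq_true, List.mem_range, Bool.and_eq_true, beq_iff_eq, Bool.true_and]
      constructor
      · rintro ⟨p, hp, h0, rfl⟩; omega
      · rintro ⟨h0, hj⟩; exact ⟨j, hj, by omega, rfl⟩
    have hcond : (List.range M).any (fun j => pvG matrix 0 j == 0) = pvRowz matrix M 0 := rfl
    unfold pvStage3
    rw [hcond]
    by_cases hr : pvRowz matrix M 0 = true
    · rw [if_pos hr]
      have e : pvG ((List.range M).foldl (fun mat j => pvW mat 0 j) (pvStage2 matrix N M)) i j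
          = if (List.range M).any (fun p => true && ((0 : Nat) == i) && (p == j)) then 0
            else pvG (pvStage2 matrix N M) i j := s3get i j
      rw [e]
      by_cases h0 : i = 0 ∧ j < M
      · rw [if_pos (hiff.mpr h0), if_pos ⟨hr, h0⟩]
      · rw [if_neg (fun hh => h0 (hiff.mp hh)), if_neg (fun hh => h0 ⟨hh.2.1, hh.2.2⟩)]
    · rw [if_neg hr, if_neg (fun hh => hr hh.1)]
  -- stage 4 facts
  obtain ⟨s4len, s4row, s4get⟩ := foldl_condW (List.range N)
    (fun _ => true) (fun i => i) (fun _ => 0) (pvStage3 matrix N M)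
  have t4len : (pvStage4 matrix N M).length = matrix.length := by
    unfold pvStage4
    split_ifs
    · exact s4len.trans t3len
    · exact t3len
  have t4row : ∀ i, ((pvStage4 matrix N M).getD i []).length = (matrix.getD i []).length := by
    intro i
    unfold pvStage4
    split_ifs
    · exact (s4row i).trans (t3row i)
    · exact t3row i
  have t4 : ∀ i j, pvG (pvStage4 matrix N M) i j
      = if pvColz matrix N 0 = true ∧ j = 0 ∧ i < N then 0 else pvG (pvStage3 matrix N M) i j := by
    intro i j
    have hiff : ((List.range N).any (fun p => true && (p == i) && ((0 : Nat) == j)) = true)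
        ↔ (j = 0 ∧ i < N) := by
      simp only [List.any_eq_true, List.mem_range, Bool.and_eq_true, beq_iff_eq, Bool.true_and]
      constructor
      · rintro ⟨p, hp, rfl, h0⟩; omega
      · rintro ⟨h0, hi⟩; exact ⟨i, hi, rfl, by omega⟩
    have hcond : (List.range N).any (fun i => pvG matrix i 0 == 0) = pvColz matrix N 0 := rfl
    unfold pvStage4
    rw [hcond]
    by_cases hc : pvColz matrix N 0 = true
    · rw [if_pos hc]
      have e : pvG ((List.range N).foldl (fun mat i => pvW mat i 0) (pvStage3 matrix N M)) i j
          = if (List.range N).any (fun p => true && (p == i) && ((0 : Nat) == j)) then 0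
            else pvG (pvStage3 matrix N M) i j := s4get i j
      rw [e]
      by_cases h0 : j = 0 ∧ i < N
      · rw [if_pos (hiff.mpr h0), if_pos ⟨hc, h0⟩]
      · rw [if_neg (fun hh => h0 (hiff.mp hh)), if_neg (fun hh => h0 ⟨hh.2.1, hh.2.2⟩)]
    · rw [if_neg hc, if_neg (fun hh => hc hh.1)]
  refine ⟨t4len, t4row, ?_⟩
  -- the pointwise assembly
  intro i j
  show pvG (pvStage4 matrix N M) i j = _
  rw [t4 i j, t3 i j, t2 i j]
  by_cases hiN : i < N
  · by_cases hjM : j < M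
    · rcases Nat.eq_zero_or_pos i with hi0 | hi1
      · subst hi0
        rcases Nat.eq_zero_or_pos j with hj0 | hj1
        · subst hj0
          by_cases hc0 : pvColz matrix N 0 = true
          · rw [if_pos ⟨hc0, rfl, hiN⟩, if_pos ⟨hiN, hjM, Or.inr hc0⟩]
          · rw [if_neg (fun hh => hc0 hh.1)]
            by_cases hr0 : pvRowz matrix M 0 = true
            · rw [if_pos ⟨hr0, rfl, hjM⟩, if_pos ⟨hiN, hjM, Or.inl hr0⟩]
            · rw [if_neg (fun hh => hr0 hh.1)]
              rw [if_neg (by rintro ⟨⟨h, _⟩, _⟩; omega)]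
              rw [if_neg (by rintro ⟨_, _, h | h⟩; exacts [hr0 h, hc0 h])]
              exact hg100
        · -- i = 0, 1 ≤ j < M
          rw [if_neg (by rintro ⟨_, hj0, _⟩; omega)]
          by_cases hr0 : pvRowz matrix M 0 = true
          · rw [if_pos ⟨hr0, rfl, hjM⟩, if_pos ⟨hiN, hjM, Or.inl hr0⟩]
          · rw [if_neg (fun hh => hr0 hh.1)]
            rw [if_neg (by rintro ⟨⟨h, _⟩, _⟩; omega)]
            rw [hg1col j hj1]
            by_cases hcz : pvColz matrix N j = true
            · by_cases hS : j < M ∧ ∃ i', i' < N ∧ 1 ≤ i' ∧ pvG matrix i' j = 0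
              · rw [if_pos hS, if_pos ⟨hiN, hjM, Or.inr hcz⟩]
              · rw [if_neg hS, if_pos ⟨hiN, hjM, Or.inr hcz⟩]
                rcases (colz_split matrix N j hN1).mp hcz with h | ⟨i', a, b, c⟩
                · exact h
                · exact ((hS ⟨hjM, i', b, a, c⟩).elim)
            · rw [if_neg (by
                rintro ⟨_, i', a, b, c⟩
                exact hcz ((colz_split matrix N j hN1).mpr (Or.inr ⟨i', b, a, c⟩)))]
              rw [if_neg (by rintro ⟨_, _, h | h⟩; exacts [hr0 h, hcz h])]
      · rcases Nat.eq_zero_or_pos j with hj0 | hj1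
        · subst hj0
          -- 1 ≤ i < N, j = 0
          by_cases hc0 : pvColz matrix N 0 = true
          · rw [if_pos ⟨hc0, rfl, hiN⟩, if_pos ⟨hiN, hjM, Or.inr hc0⟩]
          · rw [if_neg (fun hh => hc0 hh.1)]
            rw [if_neg (by rintro ⟨_, h0, _⟩; omega)]
            rw [if_neg (by rintro ⟨⟨_, _, h, _⟩, _⟩; omega)]
            rw [hg1row i hi1]
            by_cases hrz : pvRowz matrix M i = true
            · by_cases hS : i < N ∧ ∃ j', j' < M ∧ 1 ≤ j' ∧ pvG matrix i j' = 0
              · rw [if_pos hS, if_pos ⟨hiN, hjM, Or.inl hrz⟩]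
              · rw [if_neg hS, if_pos ⟨hiN, hjM, Or.inl hrz⟩]
                rcases (rowz_split matrix M i hM1).mp hrz with h | ⟨j', a, b, c⟩
                · exact h
                · exact ((hS ⟨hiN, j', b, a, c⟩).elim)
            · rw [if_neg (by
                rintro ⟨_, j', a, b, c⟩
                exact hrz ((rowz_split matrix M i hM1).mpr (Or.inr ⟨j', b, a, c⟩)))]
              rw [if_neg (by rintro ⟨_, _, h | h⟩; exacts [hrz h, hc0 h])]
        · -- interior: 1 ≤ i < N, 1 ≤ j < M
          rw [if_neg (by rintro ⟨_, h0, _⟩; omega)]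
          rw [if_neg (by rintro ⟨_, h0, _⟩; omega)]
          have hrow : pvG (pvStage1 matrix N M) i 0 = 0 ↔ pvRowz matrix M i = true := by
            rw [hg1row i hi1]
            constructor
            · intro h
              by_cases hS : i < N ∧ ∃ j', j' < M ∧ 1 ≤ j' ∧ pvG matrix i j' = 0
              · obtain ⟨_, j', a, b, c⟩ := hS
                exact (rowz_split matrix M i hM1).mpr (Or.inr ⟨j', b, a, c⟩)
              · rw [if_neg hS] at h
                exact (rowz_split matrix M i hM1).mpr (Or.inl h)
            · intro h
              rcases (rowz_split matrix M i hM1).mp h with h0 | ⟨j', a, b, c⟩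
              · by_cases hS' : i < N ∧ ∃ j', j' < M ∧ 1 ≤ j' ∧ pvG matrix i j' = 0
                · rw [if_pos hS']
                · rw [if_neg hS']; exact h0
              · rw [if_pos ⟨hiN, j', b, a, c⟩]
          have hcol : pvG (pvStage1 matrix N M) 0 j = 0 ↔ pvColz matrix N j = true := by
            rw [hg1col j hj1]
            constructor
            · intro h
              by_cases hS : j < M ∧ ∃ i', i' < N ∧ 1 ≤ i' ∧ pvG matrix i' j = 0
              · obtain ⟨_, i', a, b, c⟩ := hS
                exact (colz_split matrix N j hN1).mpr (Or.inr ⟨i', b, a, c⟩)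
              · rw [if_neg hS] at h
                exact (colz_split matrix N j hN1).mpr (Or.inl h)
            · intro h
              rcases (colz_split matrix N j hN1).mp h with h0 | ⟨i', a, b, c⟩
              · by_cases hS' : j < M ∧ ∃ i', i' < N ∧ 1 ≤ i' ∧ pvG matrix i' j = 0
                · rw [if_pos hS']
                · rw [if_neg hS']; exact h0
              · rw [if_pos ⟨hjM, i', b, a, c⟩]
          by_cases hRC : pvRowz matrix M i = true ∨ pvColz matrix N j = true
          · rw [if_pos ⟨⟨hi1, hiN, hj1, hjM⟩, by
                rcases hRC with h | h
                · exact Or.inl (hrow.mpr h)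
                · exact Or.inr (hcol.mpr h)⟩,
              if_pos ⟨hiN, hjM, hRC⟩]
          · rw [if_neg (by
                rintro ⟨_, h | h⟩
                · exact hRC (Or.inl (hrow.mp h))
                · exact hRC (Or.inr (hcol.mp h))),
              if_neg (by rintro ⟨_, _, hh⟩; exact hRC hh)]
            exact hg1a i j hi1 hj1
    · -- j ≥ M
      rw [if_neg (by rintro ⟨_, hj0, _⟩; omega)]
      rw [if_neg (by rintro ⟨_, _, h⟩; omega)]
      rw [if_neg (by rintro ⟨⟨_, _, _, h⟩, _⟩; omega)]
      rw [if_neg (by rintro ⟨_, h, _⟩; omega)]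
      exact hg1out i j (by omega)
  · -- i ≥ N
    rw [if_neg (by rintro ⟨_, _, h⟩; omega)]
    rw [if_neg (by rintro ⟨_, h0, _⟩; omega)]
    rw [if_neg (by rintro ⟨⟨_, h, _, _⟩, _⟩; omega)]
    rw [if_neg (by rintro ⟨h, _⟩; omega)]
    exact hg1out i j (by omega)

-- two lists agree if they have the same length and the same getD values
lemma list_eq_of_getD {α : Type} (d : α) {l1 l2 : List α} (hlen : l1.length = l2.length)
    (h : ∀ i, i < l1.length → l1.getD i d = l2.getD i d) : l1 = l2 := by
  apply List.ext_getElem hlen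
  intro i h1 h2
  have := h i h1
  rwa [List.getD_eq_getElem?_getD, List.getD_eq_getElem?_getD,
    List.getElem?_eq_getElem h1, List.getElem?_eq_getElem h2, Option.getD_some,
    Option.getD_some] at this

-- degenerate case: one of the bounds is nonpositive, both sides return matrix
lemma eq_of_nonpos (matrix : List (List Int)) (n m : Int) (h : n ≤ 0 ∨ m ≤ 0) :
    setmatirxzeros matrix n m = matrix ∧ setmatirxzeros_alt matrix n m = matrix := by
  constructor
  · rcases h with hn | hm
    · have hr : PySem.List.pyRange 0 n = [] := by simp [PySem.List.pyRange, hn]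
      simp [setmatirxzeros, pvZeroRows, pvZeroCols, pvMark, hr]
    · have hr : PySem.List.pyRange 0 m = [] := by simp [PySem.List.pyRange, hm]
      simp [setmatirxzeros, pvZeroRows, pvZeroCols, pvMark, hr]
  · simp [setmatirxzeros_alt, h]

-- ===== VERDICT (by name: the statement is the Claim_ definition above) =====
theorem setmatirxzeros_spec : Claim_equal_setmatirxzeros := by
  intro matrix n m _dom hpre
  unfold Spec_setmatirxzeros
  by_cases hn : n ≤ 0
  · rw [(eq_of_nonpos matrix n m (Or.inl hn)).1, (eq_of_nonpos matrix n m (Or.inl hn)).2]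
  by_cases hm : m ≤ 0
  · rw [(eq_of_nonpos matrix n m (Or.inr hm)).1, (eq_of_nonpos matrix n m (Or.inr hm)).2]
  obtain ⟨hN, hM⟩ := hpre (by omega) (by omega)
  have hn' : n = ((n.toNat : Nat) : Int) := by omega
  have hm' : m = ((m.toNat : Nat) : Int) := by omega
  rw [hn', hm']
  have hN' : n.toNat ≤ matrix.length := by omega
  have hM' : ∀ row ∈ matrix.take n.toNat, m.toNat ≤ row.length := by
    intro row hr
    have := hM row hr
    omega
  obtain ⟨la, ra, ea⟩ := setmatirxzeros_spec_main matrix n.toNat m.toNat hN' hM'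
  obtain ⟨lb, rb, eb⟩ := setmatirxzeros_alt_spec_main matrix n.toNat m.toNat (by omega) (by omega)
  apply list_eq_of_getD ([] : List Int) (by rw [la, lb])
  intro i hi
  apply list_eq_of_getD (0 : Int) (by rw [ra i, rb i])
  intro j hj
  rw [ea i j, eb i j]
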